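-- pv_equiv track=rewrite | github.com/combra-lab/ICA | ICA_ising.py | get_gather_scatter_spins_index
-- ===== SOURCE A (Python) =====
-- def get_gather_scatter_spins_index(synaptic_matrix_size):
--
--     '''
--     ASSEMBLES INDICES OF 2 SETS OF NON-NEIGHBORING SPINS
--
--     :param synaptic_matrix_size: SHAPE OF ISING LATTICE
--
--     :return: INDICES
--     '''
--
--     ## create spin lists for gather functions
--     spin_list_1 = []
--     spin_list_2 = []
--     for r in range(0, synaptic_matrix_size[0]):
--         for c in range(0, synaptic_matrix_size[1]):
--             if r % 2 == 0 and c % 2 == 0: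
--                 spin_list_1.append([r, c])
--             elif r % 2 == 1 and c % 2 == 1:
--                 spin_list_1.append([r, c])
--             elif r % 2 == 0 and c % 2 == 1:
--                 spin_list_2.append([r, c])
--             elif r % 2 == 1 and c % 2 == 0:
--                 spin_list_2.append([r, c])
--
--     return spin_list_1, spin_list_2
-- ===== SOURCE B (Python) =====
-- def get_gather_scatter_spins_index(synaptic_matrix_size):
--     rows, cols = synaptic_matrix_size[0], synaptic_matrix_size[1]
--     spin_list_1 = [[r, c] for r in range(rows) for c in range(r % 2, cols, 2)]
--     spin_list_2 = [[r, c] for r in range(rows) for c in range(1 - r % 2, cols, 2)]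
--     return spin_list_1, spin_list_2
-- ===== Notes on version B (the rewrite author's own statement) =====
-- stated objective: alternative
-- what changed: Replaces the single full-lattice scan that tests every cell's parity against four branches by two independent passes that build each output list directly with strided ranges range(r%2, cols, 2) / range(1-r%2, cols, 2), visiting only the cells that list owns.
import Mathlib
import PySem

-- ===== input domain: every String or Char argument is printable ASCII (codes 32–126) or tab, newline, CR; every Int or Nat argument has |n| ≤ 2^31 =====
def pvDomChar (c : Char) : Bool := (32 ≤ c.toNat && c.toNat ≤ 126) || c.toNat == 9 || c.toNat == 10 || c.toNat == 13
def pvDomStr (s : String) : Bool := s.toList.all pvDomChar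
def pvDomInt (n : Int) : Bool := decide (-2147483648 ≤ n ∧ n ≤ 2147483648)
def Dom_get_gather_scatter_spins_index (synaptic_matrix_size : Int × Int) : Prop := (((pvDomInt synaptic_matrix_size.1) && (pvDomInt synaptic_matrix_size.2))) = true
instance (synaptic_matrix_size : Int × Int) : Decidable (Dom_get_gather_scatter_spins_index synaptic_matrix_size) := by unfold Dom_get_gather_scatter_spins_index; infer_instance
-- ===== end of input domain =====

-- B replaces A's single full-lattice scan with four parity branches by two independent
-- strided-range passes, one per output list (alternative decomposition, same output).

-- ===== PORT A =====
def get_gather_scatter_spins_index (synaptic_matrix_size : Int × Int) : List (List Int) × List (List Int) :=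
  (PySem.List.pyRange 0 synaptic_matrix_size.1 1).foldl (fun st r =>
    (PySem.List.pyRange 0 synaptic_matrix_size.2 1).foldl (fun st c =>
      if PySem.Int.mod r 2 = 0 ∧ PySem.Int.mod c 2 = 0 then (st.1 ++ [[r, c]], st.2)
      else if PySem.Int.mod r 2 = 1 ∧ PySem.Int.mod c 2 = 1 then (st.1 ++ [[r, c]], st.2)
      else if PySem.Int.mod r 2 = 0 ∧ PySem.Int.mod c 2 = 1 then (st.1, st.2 ++ [[r, c]])
      else if PySem.Int.mod r 2 = 1 ∧ PySem.Int.mod c 2 = 0 then (st.1, st.2 ++ [[r, c]])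
      else st) st) ([], [])

-- ===== PORT B =====
def get_gather_scatter_spins_index_alt (synaptic_matrix_size : Int × Int) : List (List Int) × List (List Int) :=
  ((PySem.List.pyRange 0 synaptic_matrix_size.1 1).foldl (fun acc r =>
      acc ++ (PySem.List.pyRange (PySem.Int.mod r 2) synaptic_matrix_size.2 2).map (fun c => [r, c])) [],
   (PySem.List.pyRange 0 synaptic_matrix_size.1 1).foldl (fun acc r =>
      acc ++ (PySem.List.pyRange (1 - PySem.Int.mod r 2) synaptic_matrix_size.2 2).map (fun c => [r, c])) [])

-- ===== PRECONDITION & SPEC =====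
def Spec_get_gather_scatter_spins_index (synaptic_matrix_size : Int × Int) (out : List (List Int) × List (List Int)) : Prop := out = get_gather_scatter_spins_index_alt synaptic_matrix_size
instance (synaptic_matrix_size : Int × Int) (out : List (List Int) × List (List Int)) : Decidable (Spec_get_gather_scatter_spins_index synaptic_matrix_size out) := by unfold Spec_get_gather_scatter_spins_index; infer_instance

-- ===== CLAIM (what is proved, stated in full; the proofs are below) =====
def Claim_equal_get_gather_scatter_spins_index : Prop := ∀ (synaptic_matrix_size : Int × Int), Dom_get_gather_scatter_spins_index synaptic_matrix_size → Spec_get_gather_scatter_spins_index synaptic_matrix_size (get_gather_scatter_spins_index synaptic_matrix_size)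

-- ===== LEMMAS AND PROOFS =====

-- A strided parity range is the parity filter of the full range.
theorem filter_parity_eq_pyRange (C p : Int) (hp : p = 0 ∨ p = 1) :
    (PySem.List.pyRange 0 C 1).filter (fun c => decide (PySem.Int.mod c 2 = p)) =
      PySem.List.pyRange p C 2 := by
  have h2 : (0 : Int) < 2 := by norm_num
  have hpwf : ((PySem.List.pyRange 0 C 1).filter (fun c => decide (PySem.Int.mod c 2 = p))).Pairwise (· < ·) :=
    (PySem.List.pairwise_lt_pyRange_one 0 C).filter _
  have hpwr : (PySem.List.pyRange p C 2).Pairwise (· < ·) := by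
    rw [PySem.List.pyRange_of_pos p C h2]
    exact (List.pairwise_lt_range).map _ (fun a b h => by push_cast; omega)
  have hmem : ∀ a : Int, a ∈ PySem.List.pyRange p C 2 ↔
      a ∈ (PySem.List.pyRange 0 C 1).filter (fun c => decide (PySem.Int.mod c 2 = p)) := by
    intro a
    rw [PySem.List.mem_pyRange_iff_of_pos h2, List.mem_filter]
    simp only [PySem.List.mem_pyRange_one, decide_eq_true_eq, PySem.Int.mod_eq_emod_of_pos h2]
    omega
  have hperm : (PySem.List.pyRange p C 2).Perm
      ((PySem.List.pyRange 0 C 1).filter (fun c => decide (PySem.Int.mod c 2 = p))) :=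
    (List.perm_ext_iff_of_nodup (hpwr.imp fun h => ne_of_lt h) (hpwf.imp fun h => ne_of_lt h)).2 hmem
  have e1 := PySem.List.sorted_eq_of_perm_of_pairwise_lt
    ((PySem.List.pyRange 0 C 1).filter (fun c => decide (PySem.Int.mod c 2 = p)))
    ((PySem.List.pyRange 0 C 1).filter (fun c => decide (PySem.Int.mod c 2 = p)))
    (fun x => x) (List.Perm.refl _) hpwf
  have e2 := PySem.List.sorted_eq_of_perm_of_pairwise_lt
    ((PySem.List.pyRange 0 C 1).filter (fun c => decide (PySem.Int.mod c 2 = p)))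
    (PySem.List.pyRange p C 2) (fun x => x) hperm hpwr
  rw [← e1, e2]

-- A's inner column scan splits the full range into the two parity filters.
theorem inner_scan (r : Int) (xs : List Int) :
    ∀ st : List (List Int) × List (List Int),
    xs.foldl (fun st c =>
      if PySem.Int.mod r 2 = 0 ∧ PySem.Int.mod c 2 = 0 then (st.1 ++ [[r, c]], st.2)
      else if PySem.Int.mod r 2 = 1 ∧ PySem.Int.mod c 2 = 1 then (st.1 ++ [[r, c]], st.2)
      else if PySem.Int.mod r 2 = 0 ∧ PySem.Int.mod c 2 = 1 then (st.1, st.2 ++ [[r, c]])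
      else if PySem.Int.mod r 2 = 1 ∧ PySem.Int.mod c 2 = 0 then (st.1, st.2 ++ [[r, c]])
      else st) st =
    (st.1 ++ (xs.filter (fun c => decide (PySem.Int.mod c 2 = PySem.Int.mod r 2))).map (fun c => [r, c]),
     st.2 ++ (xs.filter (fun c => decide (PySem.Int.mod c 2 = 1 - PySem.Int.mod r 2))).map (fun c => [r, c])) := by
  induction xs with
  | nil => simp
  | cons x xs ih =>
    intro st
    rw [List.foldl_cons, ih]
    rcases PySem.Int.mod_two_eq r with hr | hr <;>
    rcases PySem.Int.mod_two_eq x with hx | hx <;>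
      simp only [List.filter_cons, hr, hx] <;>
      norm_num [List.append_assoc]

-- The outer row loop computed componentwise.
theorem outer_scan (C : Int) (rows : List Int) (l1 l2 : List (List Int)) :
    rows.foldl (fun st r =>
      (PySem.List.pyRange 0 C 1).foldl (fun st c =>
        if PySem.Int.mod r 2 = 0 ∧ PySem.Int.mod c 2 = 0 then (st.1 ++ [[r, c]], st.2)
        else if PySem.Int.mod r 2 = 1 ∧ PySem.Int.mod c 2 = 1 then (st.1 ++ [[r, c]], st.2)
        else if PySem.Int.mod r 2 = 0 ∧ PySem.Int.mod c 2 = 1 then (st.1, st.2 ++ [[r, c]])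
        else if PySem.Int.mod r 2 = 1 ∧ PySem.Int.mod c 2 = 0 then (st.1, st.2 ++ [[r, c]])
        else st) st) (l1, l2) =
    (rows.foldl (fun acc r => acc ++ (PySem.List.pyRange (PySem.Int.mod r 2) C 2).map (fun c => [r, c])) l1,
     rows.foldl (fun acc r => acc ++ (PySem.List.pyRange (1 - PySem.Int.mod r 2) C 2).map (fun c => [r, c])) l2) := by
  induction rows generalizing l1 l2 with
  | nil => simp
  | cons r rows ih =>
    have hp1 : PySem.Int.mod r 2 = 0 ∨ PySem.Int.mod r 2 = 1 := PySem.Int.mod_two_eq r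
    have hp2 : 1 - PySem.Int.mod r 2 = 0 ∨ 1 - PySem.Int.mod r 2 = 1 := by omega
    simp only [List.foldl_cons, inner_scan r (PySem.List.pyRange 0 C 1) (l1, l2),
      filter_parity_eq_pyRange C _ hp1, filter_parity_eq_pyRange C _ hp2, ih]

-- ===== VERDICT (by name: the statement is the Claim_ definition above) =====
theorem get_gather_scatter_spins_index_spec : Claim_equal_get_gather_scatter_spins_index := by
  intro sz _
  show get_gather_scatter_spins_index sz = get_gather_scatter_spins_index_alt sz
  unfold get_gather_scatter_spins_index get_gather_scatter_spins_index_alt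
  exact outer_scan sz.2 (PySem.List.pyRange 0 sz.1 1) [] []
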